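-- pv_equiv track=rewrite | github.com/aakarshsingh1217/RSP | LeetCode DSA Course/7. Greedy/2. Example Greedy Problems/partitionArr.py | partitionArr
-- ===== SOURCE A (Python) =====
-- def partitionArr(nums: list[int], k: int) -> int:
--     nums.sort()
--     ans = 1
--     x = nums[0]
--
--     for i in range(1, len(nums)):
--         if x + k < nums[i]:
--             x = nums[i]
--             ans += 1
--
--     return ans
-- ===== SOURCE B (Python) =====
-- def partitionArr(nums: list[int], k: int) -> int:
--     nums.sort()
--     n = len(nums)
--
--     def upper(lo: int, target: int) -> int:
--         # first index j in [lo, n] with nums[j] > target (binary search)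
--         hi = n
--         while lo < hi:
--             mid = (lo + hi) // 2
--             if nums[mid] <= target:
--                 lo = mid + 1
--             else:
--                 hi = mid
--         return lo
--
--     ans = 0
--     i = 0
--     while i < n:
--         ans += 1
--         i = upper(i + 1, nums[i] + k)
--     return ans
-- ===== Notes on version B (the rewrite author's own statement) =====
-- stated objective: alternative
-- what changed: After sorting, instead of scanning every element with a running anchor, B jumps from one group start to the next with a hand-written binary search (one jump per group), so only O(g log n) elements are inspected after the sort.
import Mathlib
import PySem

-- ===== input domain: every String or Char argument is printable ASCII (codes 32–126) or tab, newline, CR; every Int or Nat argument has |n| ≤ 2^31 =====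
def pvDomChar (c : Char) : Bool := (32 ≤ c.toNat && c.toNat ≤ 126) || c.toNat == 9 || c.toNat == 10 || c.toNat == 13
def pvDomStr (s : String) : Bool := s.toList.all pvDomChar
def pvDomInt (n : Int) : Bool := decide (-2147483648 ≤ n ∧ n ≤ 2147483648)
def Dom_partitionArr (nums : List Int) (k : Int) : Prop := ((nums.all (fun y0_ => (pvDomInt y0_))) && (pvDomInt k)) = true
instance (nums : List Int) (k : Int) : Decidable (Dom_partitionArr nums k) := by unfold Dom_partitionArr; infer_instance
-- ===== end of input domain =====

-- B replaces A's linear anchor scan over the sorted list by a binary-search jump from one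
-- group start to the next (alternative algorithm; return value only — both sort in place).

-- ===== PORT A =====
def partitionArr (nums : List Int) (k : Int) : Int :=
  let s := PySem.List.sorted nums (fun x => x) false
  match PySem.List.pyGet? s 0 with
  | none => 0  -- nums = []: Python raises IndexError; excluded by Pre_partitionArr
  | some x0 =>
    let st := (PySem.List.pyRange 1 (s.length : Int) 1).foldl
      (fun (st : Int × Int) i =>
        if st.1 + k < PySem.List.pyGetD s i 0 then (PySem.List.pyGetD s i 0, st.2 + 1)
        else st) (x0, 1)
    st.2

-- ===== PORT B =====
-- hand-written binary search from Source B: first index j in [lo, hi] with s[j] > target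
-- (the fuel argument, always passed as hi - lo, only makes the while-loop structurally recursive)
def pvUpper (s : List Int) (target : Int) : Nat → Nat → Nat → Nat
  | 0, lo, _ => lo
  | fuel + 1, lo, hi =>
    if lo < hi then
      -- mid = (lo + hi) // 2
      if s.getD ((lo + hi) / 2) 0 ≤ target then pvUpper s target fuel ((lo + hi) / 2 + 1) hi
      else pvUpper s target fuel lo ((lo + hi) / 2)
    else lo

-- the while-loop of Source B: count a group at i, jump to the next group start
-- (fuel, always passed as n - i, makes the loop structurally recursive)
def pvGroups (s : List Int) (k : Int) (n : Nat) : Nat → Nat → Int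
  | 0, _ => 0
  | fuel + 1, i =>
    if i < n then 1 + pvGroups s k n fuel (pvUpper s (s.getD i 0 + k) (n - (i + 1)) (i + 1) n)
    else 0

def partitionArr_alt (nums : List Int) (k : Int) : Int :=
  let s := PySem.List.sorted nums (fun x => x) false
  pvGroups s k s.length s.length 0

-- ===== PRECONDITION & SPEC =====
-- Pre_ excludes exactly the empty list, on which A raises IndexError reading nums[0].
def Pre_partitionArr (nums : List Int) (k : Int) : Prop := nums ≠ []
instance (nums : List Int) (k : Int) : Decidable (Pre_partitionArr nums k) := by unfold Pre_partitionArr; infer_instance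
def pvWitness_partitionArr : List Int × Int := ([3, 6, 1, 2, 5], 2)

def Spec_partitionArr (nums : List Int) (k : Int) (out : Int) : Prop := out = partitionArr_alt nums k
instance (nums : List Int) (k : Int) (out : Int) : Decidable (Spec_partitionArr nums k out) := by unfold Spec_partitionArr; infer_instance

-- ===== CLAIM (what is proved, stated in full; the proofs are below) =====
def Claim_equal_partitionArr : Prop := ∀ (nums : List Int) (k : Int), Dom_partitionArr nums k → Pre_partitionArr nums k → Spec_partitionArr nums k (partitionArr nums k)

-- ===== LEMMAS AND PROOFS =====

-- A's scan, written as a structural recursion on the index (proof helper; fuel = n - j)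
def aScan (s : List Int) (k : Int) (n : Nat) : Int → Nat → Nat → Int
  | _, 0, _ => 0
  | x, fuel + 1, j =>
    if j < n then
      if x + k < s.getD j 0 then 1 + aScan s k n (s.getD j 0) fuel (j + 1)
      else aScan s k n x fuel (j + 1)
    else 0

-- monotone access: the form of sortedness the binary search needs
def pvMono (s : List Int) : Prop := ∀ a b : Nat, a ≤ b → b < s.length → s.getD a 0 ≤ s.getD b 0

theorem pvMono_sorted (nums : List Int) : pvMono (PySem.List.sorted nums (fun x => x) false) := by
  intro a b hab hb
  have hp := PySem.List.sorted_pairwise (xs := nums) (key := fun x => x)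
  rw [List.pairwise_iff_getElem] at hp
  rcases Nat.lt_or_ge a b with h | h
  · have ha : a < (PySem.List.sorted nums (fun x => x) false).length := lt_trans h hb
    rw [List.getD_eq_getElem _ _ ha, List.getD_eq_getElem _ _ hb]
    exact hp a b ha hb h
  · have : a = b := le_antisymm hab h
    subst this; exact le_refl _

theorem pvUpper_ge (s : List Int) (target : Int) :
    ∀ (f lo hi : Nat), lo ≤ pvUpper s target f lo hi := by
  intro f
  induction f with
  | zero => intro lo hi; exact le_refl _
  | succ f ih =>
    intro lo hi
    rw [pvUpper]
    split_ifs with h1 h2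
    · exact le_trans (by omega) (ih ((lo + hi) / 2 + 1) hi)
    · exact ih lo ((lo + hi) / 2)
    · exact le_refl _

theorem pvUpper_spec (s : List Int) (target : Int) (hm : pvMono s) :
    ∀ (f lo hi : Nat), hi - lo ≤ f → hi ≤ s.length →
      pvUpper s target f lo hi ≤ max lo hi ∧
      (∀ j : Nat, lo ≤ j → j < pvUpper s target f lo hi → s.getD j 0 ≤ target) ∧
      (∀ j : Nat, pvUpper s target f lo hi ≤ j → j < hi → target < s.getD j 0) := by
  intro f
  induction f with
  | zero =>
    intro lo hi hf hhi
    rw [pvUpper]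
    exact ⟨le_max_left _ _, by omega, by omega⟩
  | succ f ih =>
    intro lo hi hf hhi
    rw [pvUpper]
    split_ifs with h1 h2
    · obtain ⟨ha, hb, hc⟩ := ih ((lo + hi) / 2 + 1) hi (by omega) hhi
      refine ⟨by omega, ?_, hc⟩
      intro j hj hj2
      by_cases hjm : (lo + hi) / 2 + 1 ≤ j
      · exact hb j hjm hj2
      · exact le_trans (hm j ((lo + hi) / 2) (by omega) (by omega)) h2
    · obtain ⟨ha, hb, hc⟩ := ih lo ((lo + hi) / 2) (by omega) (by omega)
      refine ⟨by omega, hb, ?_⟩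
      intro j hj hj2
      by_cases hjm : j < (lo + hi) / 2
      · exact hc j hj hjm
      · exact lt_of_lt_of_le (not_le.mp h2) (hm ((lo + hi) / 2) j (by omega) (by omega))
    · exact ⟨le_max_left _ _, by omega, by omega⟩

-- the combined jump lemma: once inside group i, A's scan from any j up to the group end
-- equals B's remaining count from the group end
theorem pvComb (s : List Int) (k : Int) (hm : pvMono s) :
    ∀ (fa : Nat), ∀ (fg i j : Nat), i < s.length → i < j →
      j ≤ pvUpper s (s.getD i 0 + k) (s.length - (i + 1)) (i + 1) s.length →
      s.length - j ≤ fa →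
      s.length - pvUpper s (s.getD i 0 + k) (s.length - (i + 1)) (i + 1) s.length ≤ fg →
      aScan s k s.length (s.getD i 0) fa j =
        pvGroups s k s.length fg (pvUpper s (s.getD i 0 + k) (s.length - (i + 1)) (i + 1) s.length) := by
  intro fa
  induction fa with
  | zero =>
    intro fg i j hi hij hju hfa hfg
    obtain ⟨ha, _, _⟩ := pvUpper_spec s (s.getD i 0 + k) hm (s.length - (i + 1)) (i + 1) s.length (by omega) (le_refl _)
    have hj : j = s.length := by omega
    have hu : pvUpper s (s.getD i 0 + k) (s.length - (i + 1)) (i + 1) s.length = s.length := by omega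
    rw [hu, aScan]
    cases fg with
    | zero => rw [pvGroups]
    | succ fg => rw [pvGroups]; simp
  | succ fa ih =>
    intro fg i j hi hij hju hfa hfg
    obtain ⟨ha, hb, hc⟩ := pvUpper_spec s (s.getD i 0 + k) hm (s.length - (i + 1)) (i + 1) s.length (by omega) (le_refl _)
    set u := pvUpper s (s.getD i 0 + k) (s.length - (i + 1)) (i + 1) s.length with hudef
    rcases Nat.lt_or_ge j u with hlt | hge
    · -- j < u ≤ length: still inside group i, the scan does not count
      have hjn : j < s.length := by omega
      rw [aScan, if_pos hjn, if_neg (by have := hb j (by omega) hlt; omega)]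
      exact ih fg i (j + 1) hi (by omega) hlt (by omega) hfg
    · -- j = u: either done, or a new group starts at u
      have hj : j = u := by omega
      rw [hj]
      rcases Nat.lt_or_ge u s.length with hun | hun
      · have hgt : s.getD i 0 + k < s.getD u 0 := hc u (le_refl _) hun
        cases fg with
        | zero => omega
        | succ fg =>
          rw [aScan, if_pos hun, if_pos hgt, pvGroups, if_pos hun]
          congr 1
          have hgej := pvUpper_ge s (s.getD u 0 + k) (s.length - (u + 1)) (u + 1) s.length
          obtain ⟨ha', _, _⟩ := pvUpper_spec s (s.getD u 0 + k) hm (s.length - (u + 1)) (u + 1) s.length (by omega) (le_refl _)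
          exact ih fg u (u + 1) hun (by omega) hgej (by omega) (by omega)
      · have hun' : u = s.length := by omega
        rw [aScan, if_neg (by omega)]
        cases fg with
        | zero => rw [pvGroups]
        | succ fg => rw [pvGroups]; rw [hun']; simp

theorem pvMain (s : List Int) (k : Int) (hm : pvMono s) (i : Nat) (hi : i < s.length) :
    ∀ (fg : Nat), s.length - i ≤ fg →
      pvGroups s k s.length fg i = 1 + aScan s k s.length (s.getD i 0) (s.length - (i + 1)) (i + 1) := by
  intro fg hfg
  cases fg with
  | zero => omega
  | succ fg =>
    rw [pvGroups, if_pos hi]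
    congr 1
    have hge := pvUpper_ge s (s.getD i 0 + k) (s.length - (i + 1)) (i + 1) s.length
    exact (pvComb s k hm (s.length - (i + 1)) fg i (i + 1) hi (by omega) hge (by omega) (by omega)).symm

-- A's foldl over pyRange equals the fuel scan
theorem pvFold (s : List Int) (k : Int) :
    ∀ (fa j : Nat), j ≤ s.length → s.length - j = fa → ∀ x a : Int,
      ((PySem.List.pyRange (j : Int) (s.length : Int) 1).foldl
        (fun (st : Int × Int) i =>
          if st.1 + k < PySem.List.pyGetD s i 0 then (PySem.List.pyGetD s i 0, st.2 + 1)
          else st) (x, a)).2 = a + aScan s k s.length x fa j := by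
  intro fa
  induction fa with
  | zero =>
    intro j hj hfa x a
    have : j = s.length := by omega
    subst this
    rw [PySem.List.pyRange_one_eq_nil (le_refl _), aScan]
    simp
  | succ fa ih =>
    intro j hj hfa x a
    have hjn : j < s.length := by omega
    rw [PySem.List.pyRange_one_cons (by exact_mod_cast hjn)]
    simp only [List.foldl_cons, PySem.List.pyGetD_natCast]
    have hcast : ((j : Int) + 1) = ((j + 1 : Nat) : Int) := by push_cast; ring
    rw [hcast]
    by_cases hc : x + k < s.getD j 0
    · rw [if_pos hc, ih (j + 1) (by omega) (by omega), aScan, if_pos hjn, if_pos hc]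
      ring
    · rw [if_neg hc, ih (j + 1) (by omega) (by omega), aScan, if_pos hjn, if_neg hc]

-- the A-side expression over an arbitrary monotone nonempty list equals B's loop
theorem pvKey (s : List Int) (k : Int) (hm : pvMono s) (hne : s ≠ []) :
    (match PySem.List.pyGet? s 0 with
     | none => (0 : Int)
     | some x0 =>
       ((PySem.List.pyRange 1 (s.length : Int) 1).foldl
         (fun (st : Int × Int) i =>
           if st.1 + k < PySem.List.pyGetD s i 0 then (PySem.List.pyGetD s i 0, st.2 + 1)
           else st) (x0, 1)).2) = pvGroups s k s.length s.length 0 := by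
  have h0 : 0 < s.length := List.length_pos_iff.mpr hne
  rw [PySem.List.pyGet?_zero, List.getElem?_eq_getElem h0]
  simp only
  rw [← List.getD_eq_getElem s 0 h0]
  have hf := pvFold s k (s.length - 1) 1 (by omega) (by omega) (s.getD 0 0) 1
  push_cast at hf
  rw [hf, pvMain s k hm 0 h0 s.length (by omega)]

-- ===== VERDICT (by name: the statement is the Claim_ definition above) =====
theorem partitionArr_spec : Claim_equal_partitionArr := by
  intro nums k _ hpre
  have hne : PySem.List.sorted nums (fun x => x) false ≠ [] := by
    intro h
    apply hpre
    have h2 : (PySem.List.sorted nums (fun x => x) false).length = nums.length :=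
      (PySem.List.sorted_perm nums (fun x => x) false).length_eq
    rw [h] at h2
    exact List.length_eq_zero_iff.mp h2.symm
  exact pvKey (PySem.List.sorted nums (fun x => x) false) k (pvMono_sorted nums) hne
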